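-- pv_equiv track=rewrite | github.com/Viljen789/AdventofCode | 2024/7.py | rec
-- ===== SOURCE A (Python) =====
-- def rec(factors, l, i, concat = False):
--     if(i==len(factors)):
--         return l
--     nl = []
--     cur = factors[i]
--     for element in l:
--         nl.append(element*cur)
--         nl.append(element+cur)
--         if(concat):nl.append(int(str(element)+str(cur)))
--     return rec(factors, nl, i+1, concat)
-- ===== SOURCE B (Python) =====
-- def rec(factors, l, i, concat=False):
--     # Iterative: fold each remaining factor over the running result list,
--     # replacing each element by its product, sum (and concat) with that factor.
--     result = l
--     for j in range(i, len(factors)):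
--         cur = factors[j]
--         if concat:
--             result = [v for e in result
--                         for v in (e * cur, e + cur, int(str(e) + str(cur)))]
--         else:
--             result = [v for e in result for v in (e * cur, e + cur)]
--     return result
-- ===== Notes on version B (the rewrite author's own statement) =====
-- stated objective: simpler
-- what changed: Replaces the tail recursion with an explicit loop over range(i, len(factors)) and builds each generation with a flattening comprehension instead of an append-accumulator inner loop.
import Mathlib
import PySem

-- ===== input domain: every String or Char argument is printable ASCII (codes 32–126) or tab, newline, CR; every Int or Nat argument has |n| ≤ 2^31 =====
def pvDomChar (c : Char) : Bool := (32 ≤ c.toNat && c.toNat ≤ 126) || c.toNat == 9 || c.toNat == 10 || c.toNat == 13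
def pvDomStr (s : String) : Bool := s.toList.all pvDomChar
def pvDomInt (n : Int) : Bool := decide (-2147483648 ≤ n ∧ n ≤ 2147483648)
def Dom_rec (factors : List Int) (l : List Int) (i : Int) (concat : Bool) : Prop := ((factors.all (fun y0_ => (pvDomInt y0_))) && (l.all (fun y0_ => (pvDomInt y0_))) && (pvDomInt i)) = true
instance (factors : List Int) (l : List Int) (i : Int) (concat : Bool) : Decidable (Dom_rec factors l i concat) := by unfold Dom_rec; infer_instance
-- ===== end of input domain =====

-- B replaces A's tail recursion by an explicit loop over the remaining indices with a
-- flattening comprehension per step (objective: simpler); same return value on Pre_rec.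

-- ===== PORT A =====
-- int(str(element)+str(cur)): exact wherever Python's int() succeeds (Pre_rec excludes
-- the ValueError case cur < 0 with a nonempty running list); defaults to 0 on none.
def pyConcatInt (e c : Int) : Int :=
  (PySem.Int.ofStr? (PySem.Int.toStr e ++ PySem.Int.toStr c)).getD 0

def rec (factors : List Int) (l : List Int) (i : Int) (concat : Bool) : List Int :=
  if i = (factors.length : Int) then l
  else if hin : PySem.Raise.InRange factors.length i then
    -- cur = factors[i]; in range here, so getD is exact
    let cur : Int := (PySem.List.pyGet? factors i).getD 0
    let nl : List Int := l.foldl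
      (fun nl e => nl ++ ([e * cur] ++ [e + cur] ++ (if concat then [pyConcatInt e cur] else []))) []
    rec factors nl (i + 1) concat
  else []  -- IndexError (outside Pre_rec)
termination_by ((factors.length : Int) - i).toNat
decreasing_by
  have : i < (factors.length : Int) := by
    have h := hin; unfold PySem.Raise.InRange at h; omega
  omega

-- ===== PORT B =====
def rec_alt (factors : List Int) (l : List Int) (i : Int) (concat : Bool) : List Int :=
  (PySem.List.pyRange i (factors.length : Int) 1).foldl
    (fun result j =>
      let cur : Int := (PySem.List.pyGet? factors j).getD 0
      if concat then
        result.flatMap (fun e => [e * cur, e + cur, pyConcatInt e cur])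
      else
        result.flatMap (fun e => [e * cur, e + cur]))
    l

-- ===== PRECONDITION & SPEC =====
-- Pre_rec = exactly the inputs where Python A returns: the starting index must be a valid
-- (possibly negative, Python-style) index or equal to len(factors) (otherwise IndexError),
-- and with concat the remaining factors must be nonnegative unless l is empty (otherwise
-- int(str(element)+str(cur)) raises ValueError on the first negative factor).
def Pre_rec (factors : List Int) (l : List Int) (i : Int) (concat : Bool) : Prop :=
  (-(factors.length : Int) ≤ i ∧ i ≤ (factors.length : Int)) ∧
  (concat = true → l = [] ∨
    ∀ j ∈ PySem.List.pyRange i (factors.length : Int) 1,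
      0 ≤ (PySem.List.pyGet? factors j).getD 0)
instance (factors : List Int) (l : List Int) (i : Int) (concat : Bool) : Decidable (Pre_rec factors l i concat) := by unfold Pre_rec; infer_instance

def pvWitness_rec : List Int × List Int × Int × Bool := ([2, 3], [1, 5], 0, true)

def Spec_rec (factors : List Int) (l : List Int) (i : Int) (concat : Bool) (out : List Int) : Prop := out = rec_alt factors l i concat
instance (factors : List Int) (l : List Int) (i : Int) (concat : Bool) (out : List Int) : Decidable (Spec_rec factors l i concat out) := by unfold Spec_rec; infer_instance

-- ===== CLAIM (what is proved, stated in full; the proofs are below) =====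
def Claim_equal_rec : Prop := ∀ (factors : List Int) (l : List Int) (i : Int) (concat : Bool), Dom_rec factors l i concat → Pre_rec factors l i concat → Spec_rec factors l i concat (rec factors l i concat)

-- ===== LEMMAS AND PROOFS =====

-- One generation of A's inner append loop equals B's flatMap step.
lemma step_eq (l : List Int) (cur : Int) (concat : Bool) :
    l.foldl (fun nl e => nl ++ ([e * cur] ++ [e + cur] ++
        (if concat then [pyConcatInt e cur] else []))) []
    = (if concat then l.flatMap (fun e => [e * cur, e + cur, pyConcatInt e cur])
       else l.flatMap (fun e => [e * cur, e + cur])) := by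
  rw [PySem.List.foldl_append_eq_flatMap]
  cases concat <;> simp

-- A's recursion from index i equals B's fold over pyRange i len.
lemma rec_eq_alt (factors : List Int) (concat : Bool) :
    ∀ (n : Nat) (i : Int) (l : List Int),
      -(factors.length : Int) ≤ i → i ≤ (factors.length : Int) →
      (((factors.length : Int) - i).toNat = n) →
      rec factors l i concat = rec_alt factors l i concat := by
  intro n
  induction n with
  | zero =>
      intro i l h1 h2 h3
      have hi : i = (factors.length : Int) := by omega
      rw [rec, rec_alt]
      simp [hi, PySem.List.pyRange_one_eq_nil (le_refl _)]
  | succ n ih =>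
      intro i l h1 h2 h3
      have hlt : i < (factors.length : Int) := by omega
      have hin : PySem.Raise.InRange factors.length i := by
        unfold PySem.Raise.InRange; omega
      rw [rec]
      have hne : ¬ (i = (factors.length : Int)) := by omega
      simp only [hne, if_false, hin, dif_pos]
      rw [ih (i + 1) _ (by omega) (by omega) (by omega)]
      unfold rec_alt
      rw [PySem.List.pyRange_one_cons hlt]
      simp only [List.foldl_cons]
      congr 1
      rw [step_eq]

-- ===== VERDICT (by name: the statement is the Claim_ definition above) =====
theorem rec_spec : Claim_equal_rec := by
  intro factors l i concat _ hpre
  unfold Spec_rec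
  exact rec_eq_alt factors concat (((factors.length : Int) - i).toNat) i l
    hpre.1.1 hpre.1.2 rfl
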